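-- pv_equiv track=rewrite | github.com/vegarsti/image-to-table-web | api.py | find_all_dividing_points
-- ===== SOURCE A (Python) =====
-- def find_all_dividing_points(all_divisions):
--     all_midpoints = []
--     for divisions in all_divisions:
--         midpoints = []
--         for left, right in divisions:
--             midpoints.append(right)
--         all_midpoints.append(midpoints)
--     transposed_midpoints = list(zip(*all_midpoints))
--     dividing_points = []
--     for column_midpoints in transposed_midpoints:
--         dividing_points.append(int(max(column_midpoints)))
--     return dividing_points
-- ===== SOURCE B (Python) =====
-- def find_all_dividing_points(all_divisions):
--     if not all_divisions:
--         return []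
--     maxes = [right for _, right in all_divisions[0]]
--     for divisions in all_divisions[1:]:
--         if len(divisions) < len(maxes):
--             del maxes[len(divisions):]
--         for i, (_, right) in enumerate(divisions[:len(maxes)]):
--             if right > maxes[i]:
--                 maxes[i] = right
--     return [int(m) for m in maxes]
-- ===== Notes on version B (the rewrite author's own statement) =====
-- stated objective: alternative
-- what changed: Replaces A's build-all-rows + zip(*) transpose + per-column max with a single pass that maintains a running-maxima list, truncating it to each division's length to reproduce zip's min-length semantics.
import Mathlib
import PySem

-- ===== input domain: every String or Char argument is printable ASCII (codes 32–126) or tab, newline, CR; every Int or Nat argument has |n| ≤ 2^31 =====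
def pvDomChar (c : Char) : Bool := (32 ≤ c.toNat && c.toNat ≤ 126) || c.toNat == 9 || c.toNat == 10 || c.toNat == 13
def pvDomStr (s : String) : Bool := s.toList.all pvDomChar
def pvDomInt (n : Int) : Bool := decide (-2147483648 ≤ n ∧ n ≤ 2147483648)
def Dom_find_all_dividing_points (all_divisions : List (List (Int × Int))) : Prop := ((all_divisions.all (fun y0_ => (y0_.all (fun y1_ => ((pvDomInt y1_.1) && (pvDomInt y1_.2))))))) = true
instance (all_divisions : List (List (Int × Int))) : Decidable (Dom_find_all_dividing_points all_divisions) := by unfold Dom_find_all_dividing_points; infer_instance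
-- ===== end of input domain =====

-- B replaces A's build-all-rows + zip(*) transpose + per-column max with one pass maintaining running maxima (alternative decomposition, same cost).
-- ===== PORT A =====
-- zipStar ports Python's zip(*rows): columns up to the shortest row; zip(*[]) = [], zip(*[r]) = singletons
def pyZipStar : List (List Int) → List (List Int)
  | [] => []
  | [r] => r.map (fun x => [x])
  | r :: rest => List.zipWith (· :: ·) r (pyZipStar rest)

-- max(nonempty list) as Python computes it; [] never reached (zip columns are nonempty)
def pyColMax : List Int → Int
  | [] => 0
  | h :: t => t.foldl max h

def find_all_dividing_points (all_divisions : List (List (Int × Int))) : List Int :=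
  let all_midpoints := all_divisions.map (fun divisions => divisions.map (fun lr => lr.2))
  let transposed_midpoints := pyZipStar all_midpoints
  transposed_midpoints.map pyColMax

-- ===== PORT B =====
def find_all_dividing_points_alt (all_divisions : List (List (Int × Int))) : List Int :=
  match all_divisions with
  | [] => []
  | d0 :: rest =>
    rest.foldl
      (fun maxes divisions =>
        ((maxes.take divisions.length).zip divisions).map (fun cp => max cp.1 cp.2.2))
      (d0.map (fun lr => lr.2))

-- ===== PRECONDITION & SPEC =====
def Spec_find_all_dividing_points (all_divisions : List (List (Int × Int))) (out : List Int) : Prop := out = find_all_dividing_points_alt all_divisions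
instance (all_divisions : List (List (Int × Int))) (out : List Int) : Decidable (Spec_find_all_dividing_points all_divisions out) := by unfold Spec_find_all_dividing_points; infer_instance

-- ===== CLAIM (what is proved, stated in full; the proofs are below) =====
def Claim_equal_find_all_dividing_points : Prop := ∀ (all_divisions : List (List (Int × Int))), Dom_find_all_dividing_points all_divisions → Spec_find_all_dividing_points all_divisions (find_all_dividing_points all_divisions)

-- ===== LEMMAS AND PROOFS =====

-- ===== VERDICT (by name: the statement is the Claim_ definition above) =====
-- B's step on a division equals the plain zip-max step on the division's right endpoints
lemma step_eq (m : List Int) (d : List (Int × Int)) :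
    ((m.take d.length).zip d).map (fun cp => max cp.1 cp.2.2)
      = (m.zip (d.map (fun lr => lr.2))).map (fun p => max p.1 p.2) := by
  induction m generalizing d with
  | nil => simp
  | cons a m ih =>
    cases d with
    | nil => simp
    | cons p d => simp [ih]

lemma colMax_cons_cons (a b : Int) (xs : List Int) :
    pyColMax (a :: b :: xs) = pyColMax (max a b :: xs) := by
  simp [pyColMax]

-- merging the first two rows by pointwise max preserves column maxima
lemma merge_cols (r0 r1 : List Int) (C : List (List Int)) :
    (List.zipWith (· :: ·) r0 (List.zipWith (· :: ·) r1 C)).map pyColMax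
      = (List.zipWith (· :: ·) (List.zipWith max r0 r1) C).map pyColMax := by
  induction r0 generalizing r1 C with
  | nil => simp
  | cons a r0 ih =>
    cases r1 with
    | nil => simp
    | cons b r1 =>
      cases C with
      | nil => simp
      | cons c C => simp [colMax_cons_cons, ih]

lemma merge_single (r0 r1 : List Int) :
    (List.zipWith (· :: ·) r0 (r1.map (fun x => [x]))).map pyColMax
      = (List.zipWith max r0 r1).map (fun x => pyColMax [x]) := by
  induction r0 generalizing r1 with
  | nil => simp
  | cons a r0 ih =>
    cases r1 with
    | nil => simp
    | cons b r1 => simp [pyColMax, ih]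

lemma single_cols (r : List Int) :
    (r.map (fun x => [x])).map pyColMax = r := by
  induction r with
  | nil => rfl
  | cons a r ih => simp [pyColMax, ih]

lemma zip_max (m r : List Int) :
    (m.zip r).map (fun p => max p.1 p.2) = List.zipWith max m r := by
  induction m generalizing r with
  | nil => simp
  | cons a m ih =>
    cases r with
    | nil => simp
    | cons b r => simp [ih]

lemma main_lemma (r0 : List Int) (rest : List (List Int)) :
    (pyZipStar (r0 :: rest)).map pyColMax
      = rest.foldl (fun m r => (m.zip r).map (fun p => max p.1 p.2)) r0 := by
  induction rest generalizing r0 with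
  | nil => simpa [pyZipStar] using single_cols r0
  | cons r1 rest ih =>
    have h := ih (List.zipWith max r0 r1)
    rw [List.foldl_cons, zip_max, ← h]
    cases rest with
    | nil =>
      simp only [pyZipStar]
      rw [merge_single, single_cols]
      simp [pyColMax]
    | cons r2 rest' =>
      simp only [pyZipStar]
      exact merge_cols r0 r1 _

lemma fold_eq (rest : List (List (Int × Int))) (m : List Int) :
    (rest.map (fun divisions => divisions.map (fun lr => lr.2))).foldl
        (fun m r => (m.zip r).map (fun p => max p.1 p.2)) m
      = rest.foldl
          (fun maxes divisions =>
            ((maxes.take divisions.length).zip divisions).map (fun cp => max cp.1 cp.2.2)) m := by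
  induction rest generalizing m with
  | nil => rfl
  | cons d rest ih =>
    simp only [List.map_cons, List.foldl_cons]
    rw [step_eq, ih]

lemma ports_agree (all_divisions : List (List (Int × Int))) :
    find_all_dividing_points all_divisions = find_all_dividing_points_alt all_divisions := by
  cases all_divisions with
  | nil => rfl
  | cons d0 rest =>
    unfold find_all_dividing_points find_all_dividing_points_alt
    simp only [List.map_cons]
    rw [main_lemma, fold_eq]

-- ===== VERDICT (by name: the statement is the Claim_ definition above) =====
theorem find_all_dividing_points_spec : Claim_equal_find_all_dividing_points := by
  intro all_divisions _
  unfold Spec_find_all_dividing_points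
  exact ports_agree all_divisions
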